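-- pv_equiv track=rewrite | github.com/juderozario08/PythonProjects | ExamReview/exam prep 2020 questions/q4_7.py | underscore
-- ===== SOURCE A (Python) =====
-- def underscore(sentence):
--     '''
--     Assumes sentence is a string of words separated by blanks,
--     and that sentence is not an empty string.
--     Returns a string just like sentence but that there is an
--     underscore after each letter in each word except the last letter of
--     each word.
--
--     For example,
--     underscore('This is a rainy day') returns 'T_h_i_s i_s a r_a_i_n_y d_a_y'
--     underscore('blue') produces 'b_l_u_e'.
--
--     '''
--
--     underSentence = ''
--
--     for c in range(len(sentence)-1):
--       underSentence += sentence[c]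
--
--       if sentence[c] != ' ' and sentence[c+1] != ' ':
--         underSentence += '_'
--
--     return underSentence + sentence[-1]
--
--     pass
-- ===== SOURCE B (Python) =====
-- def underscore(sentence):
--     return ' '.join('_'.join(word) for word in sentence.split(' '))
-- ===== Notes on version B (the rewrite author's own statement) =====
-- stated objective: idiomatic
-- what changed: B splits the sentence into words on single spaces and joins each word's characters with an underscore via str.join, instead of A's index loop over characters with a one-ahead space comparison and quadratic string concatenation.
import Mathlib
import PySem

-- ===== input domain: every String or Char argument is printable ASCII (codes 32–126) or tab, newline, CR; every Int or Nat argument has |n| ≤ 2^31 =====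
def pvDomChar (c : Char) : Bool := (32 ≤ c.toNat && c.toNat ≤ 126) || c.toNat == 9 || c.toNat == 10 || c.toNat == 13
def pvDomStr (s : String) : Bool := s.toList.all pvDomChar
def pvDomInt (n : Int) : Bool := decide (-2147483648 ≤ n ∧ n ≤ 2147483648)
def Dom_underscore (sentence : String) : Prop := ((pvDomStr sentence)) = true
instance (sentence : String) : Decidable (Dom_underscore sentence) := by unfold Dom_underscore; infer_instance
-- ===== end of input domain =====

-- B replaces A's quadratic index loop (one-ahead space comparison, string +=) by split-on-space / join-with-underscore (idiomatic; measured faster).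

-- ===== PORT A =====
-- for c in range(len(sentence)-1): under += sentence[c]; if sentence[c] != ' ' and sentence[c+1] != ' ': under += '_'
-- return under + sentence[-1]   (sentence[-1] raises IndexError on "", excluded by Pre_)
def underscore (sentence : String) : String :=
  let cs := sentence.toList
  let underSentence :=
    (List.range (cs.length - 1)).foldl
      (fun acc (c : Nat) =>
        let acc := acc ++ [PySem.List.pyGetD cs (c : Int) ' ']
        if PySem.List.pyGetD cs (c : Int) ' ' ≠ ' ' ∧ PySem.List.pyGetD cs ((c : Int) + 1) ' ' ≠ ' '
        then acc ++ ['_'] else acc) []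
  String.ofList (underSentence ++ [PySem.List.pyGetD cs (-1) ' '])

-- ===== PORT B =====
-- return ' '.join('_'.join(word) for word in sentence.split(' '))
def underscore_alt (sentence : String) : String :=
  String.ofList (List.intercalate [' ']
    ((sentence.toList.splitOn ' ').map
      (fun word => List.intercalate ['_'] (word.map (fun c => [c])))))

-- ===== PRECONDITION & SPEC =====
-- Pre_ excludes only the empty string, on which A raises IndexError at sentence[-1].
def Pre_underscore (sentence : String) : Prop := sentence ≠ ""
instance (sentence : String) : Decidable (Pre_underscore sentence) := by unfold Pre_underscore; infer_instance

def pvWitness_underscore : String := "This is a rainy day"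

def Spec_underscore (sentence : String) (out : String) : Prop := out = underscore_alt sentence
instance (sentence : String) (out : String) : Decidable (Spec_underscore sentence out) := by unfold Spec_underscore; infer_instance

-- ===== CLAIM (what is proved, stated in full; the proofs are below) =====
def Claim_equal_underscore : Prop := ∀ (sentence : String), Dom_underscore sentence → Pre_underscore sentence → Spec_underscore sentence (underscore sentence)

-- ===== LEMMAS AND PROOFS =====

-- the common shape both programs compute on a nonempty character list
def pvG : List Char → List Char
  | [] => []
  | [x] => [x]
  | a :: b :: t => a :: (if a ≠ ' ' ∧ b ≠ ' ' then '_' :: pvG (b :: t) else pvG (b :: t))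

-- A's loop body after resolving the (always in-range) indices
def pvStep (cs : List Char) (acc : List Char) (c : Nat) : List Char :=
  let acc := acc ++ [cs.getD c ' ']
  if cs.getD c ' ' ≠ ' ' ∧ cs.getD (c + 1) ' ' ≠ ' ' then acc ++ ['_'] else acc

-- the body of A's loop, described structurally
def pvF : List Char → List Char
  | [] => []
  | [_] => []
  | a :: b :: t => a :: (if a ≠ ' ' ∧ b ≠ ' ' then ['_'] else []) ++ pvF (b :: t)

theorem pvStep_cons (a : Char) (t : List Char) (acc : List Char) (i : Nat) :
    pvStep (a :: t) acc (i + 1) = pvStep t acc i := by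
  simp [pvStep]

theorem foldl_range_pvStep (cs : List Char) (acc : List Char) :
    (List.range (cs.length - 1)).foldl (pvStep cs) acc = acc ++ pvF cs := by
  induction cs generalizing acc with
  | nil => simp [pvF]
  | cons a t ih =>
    cases t with
    | nil => simp [pvF]
    | cons b t' =>
      have hlen : (a :: b :: t').length - 1 = (b :: t').length - 1 + 1 := by
        simp
      rw [hlen, List.range_succ_eq_map, List.foldl_cons, List.foldl_map]
      have hshift : (fun (x : List Char) (y : Nat) => pvStep (a :: b :: t') x (Nat.succ y))
          = pvStep (b :: t') := by
        funext x y
        exact pvStep_cons a (b :: t') x y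
      rw [hshift, ih]
      simp only [pvStep, pvF, List.getD_cons_zero, List.getD_cons_succ]
      by_cases h : a ≠ ' ' ∧ b ≠ ' ' <;> simp [h]

theorem pvF_last_eq_pvG (cs : List Char) (h : cs ≠ []) :
    pvF cs ++ [cs.getLast h] = pvG cs := by
  induction cs with
  | nil => exact absurd rfl h
  | cons a t ih =>
    cases t with
    | nil => simp [pvF, pvG]
    | cons b t' =>
      have := ih (by simp)
      simp only [pvF, pvG, List.getLast_cons (l := b :: t') (by simp)]
      by_cases hab : a ≠ ' ' ∧ b ≠ ' ' <;> simp [hab, this]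

-- A equals pvG on nonempty input
theorem underscore_eq_pvG (sentence : String) (h : sentence.toList ≠ []) :
    underscore sentence = String.ofList (pvG sentence.toList) := by
  unfold underscore
  have hstep : (fun (acc : List Char) (c : Nat) =>
      let acc := acc ++ [PySem.List.pyGetD sentence.toList (c : Int) ' ']
      if PySem.List.pyGetD sentence.toList (c : Int) ' ' ≠ ' ' ∧
         PySem.List.pyGetD sentence.toList ((c : Int) + 1) ' ' ≠ ' '
      then acc ++ ['_'] else acc) = pvStep sentence.toList := by
    funext acc c
    have h1 : ((c : Int) + 1) = ((c + 1 : Nat) : Int) := by push_cast; ring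
    simp only [pvStep, h1, PySem.List.pyGetD_natCast]
  simp only [hstep, foldl_range_pvStep, List.nil_append,
    PySem.List.pyGetD_neg_one sentence.toList ' ' h]
  rw [pvF_last_eq_pvG sentence.toList h]

-- B-side abbreviations
def pvUnd (w : List Char) : List Char := List.intercalate ['_'] (w.map (fun c => [c]))
def pvB (cs : List Char) : List Char := List.intercalate [' '] ((cs.splitOn ' ').map pvUnd)

theorem intercalate_cons_cons (sep x y : List Char) (l : List (List Char)) :
    List.intercalate sep (x :: y :: l) = x ++ sep ++ List.intercalate sep (y :: l) := by
  simp [List.intercalate, List.intersperse]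

theorem pvUnd_cons (a : Char) (w : List Char) (hw : w ≠ []) :
    pvUnd (a :: w) = a :: '_' :: pvUnd w := by
  cases w with
  | nil => exact absurd rfl hw
  | cons c w' =>
    simp only [pvUnd, List.map_cons]
    rw [intercalate_cons_cons]
    simp

theorem splitOn_exists_cons (cs : List Char) :
    ∃ w ws, cs.splitOn ' ' = w :: ws := by
  have h := List.splitOnP_ne_nil (fun c => c == ' ') cs
  cases hc : cs.splitOn ' ' with
  | nil => exact absurd hc h
  | cons w ws => exact ⟨w, ws, rfl⟩

theorem pvG_space (t : List Char) : pvG (' ' :: t) = ' ' :: pvG t := by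
  cases t <;> simp [pvG]

-- effect on the joined string of consing a non-space character onto the first word
theorem pvB_consHead (cs : List Char) (a : Char) (ha : a ≠ ' ') :
    List.intercalate [' '] (((cs.splitOn ' ').modifyHead (List.cons a)).map pvUnd)
      = a :: (if cs ≠ [] ∧ cs.head? ≠ some ' ' then '_' :: pvB cs else pvB cs) := by
  cases cs with
  | nil =>
    simp [pvB, List.splitOn, List.splitOnP_nil, pvUnd, List.intercalate]
  | cons c t =>
    by_cases hc : c = ' '
    · subst hc
      have hsplit : (' ' :: t).splitOn ' ' = [] :: t.splitOn ' ' := by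
        rw [List.splitOn, List.splitOn, List.splitOnP_cons]; simp
      obtain ⟨w, ws, hws⟩ := splitOn_exists_cons t
      simp only [pvB, hsplit, hws, List.modifyHead, List.map_cons]
      rw [intercalate_cons_cons, intercalate_cons_cons]
      simp [pvUnd, List.intercalate]
    · have hsplit : (c :: t).splitOn ' ' = (t.splitOn ' ').modifyHead (List.cons c) := by
        rw [List.splitOn, List.splitOn, List.splitOnP_cons]; simp [hc]
      obtain ⟨w, ws, hws⟩ := splitOn_exists_cons t
      simp only [pvB, hsplit, hws, List.modifyHead, List.map_cons]
      have hcw : pvUnd (a :: c :: w) = a :: '_' :: pvUnd (c :: w) :=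
        pvUnd_cons a (c :: w) (by simp)
      cases ws with
      | nil => simp [List.intercalate, hcw, hc]
      | cons y ys =>
        simp only [List.map_cons]
        rw [intercalate_cons_cons, intercalate_cons_cons, hcw]
        simp [hc]

theorem pvB_eq_pvG (cs : List Char) : pvB cs = pvG cs := by
  induction cs with
  | nil => simp [pvB, List.splitOn, List.splitOnP_nil, pvUnd, List.intercalate, pvG]
  | cons a t ih =>
    by_cases ha : a = ' '
    · subst ha
      have hsplit : (' ' :: t).splitOn ' ' = [] :: t.splitOn ' ' := by
        rw [List.splitOn, List.splitOn, List.splitOnP_cons]; simp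
      obtain ⟨w, ws, hws⟩ := splitOn_exists_cons t
      simp only [pvB, hsplit, hws, List.map_cons]
      rw [intercalate_cons_cons, pvG_space]
      simpa [pvUnd, pvB, hws, List.intercalate] using ih
    · have hsplit : (a :: t).splitOn ' ' = (t.splitOn ' ').modifyHead (List.cons a) := by
        rw [List.splitOn, List.splitOn, List.splitOnP_cons]; simp [ha]
      have hmain : pvB (a :: t)
          = a :: (if t ≠ [] ∧ t.head? ≠ some ' ' then '_' :: pvB t else pvB t) := by
        simpa [pvB, hsplit] using pvB_consHead t a ha
      rw [hmain, ih]
      cases t with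
      | nil => simp [pvG]
      | cons b t' =>
        by_cases hb : b = ' '
        · simp [pvG, hb, ha]
        · simp [pvG, hb, ha]

theorem underscore_alt_eq_pvG (sentence : String) :
    underscore_alt sentence = String.ofList (pvG sentence.toList) := by
  unfold underscore_alt
  rw [show (List.intercalate [' ']
      ((sentence.toList.splitOn ' ').map
        (fun word => List.intercalate ['_'] (word.map (fun c => [c]))))) = pvB sentence.toList
    from rfl, pvB_eq_pvG]

-- ===== VERDICT (by name: the statement is the Claim_ definition above) =====
theorem underscore_spec : Claim_equal_underscore := by
  intro sentence _ hpre
  unfold Spec_underscore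
  have h : sentence.toList ≠ [] := by
    simpa [Pre_underscore] using hpre
  rw [underscore_eq_pvG sentence h, underscore_alt_eq_pvG]
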